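-- pv_equiv track=rewrite | github.com/gabrielegrillo/Fondamenti1-Unical | Lab2Set.py | debolezza
-- ===== SOURCE A (Python) =====
-- def numerodivisori(x):
--     div = 0
--     for i in range(1,x):
--         if (x % i == 0):
--             div += 1
--     return div
--
-- def debolezza(x):
--     deb = 0
--     div_x = numerodivisori(x)
--     for i in range(1,x):
--         div_i = numerodivisori(i)
--         if (div_i > div_x):
--             deb += 1
--     return deb
-- ===== SOURCE B (Python) =====
-- def debolezza(x):
--     # Sieve: for each d, bump every proper multiple of d, giving each m its
--     # count of divisors smaller than m in one O(x log x) pass.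
--     if x <= 1:
--         return 0
--     counts = [0] * (x + 1)
--     for d in range(1, x):
--         for k in range(2, x // d + 1):
--             counts[k * d] += 1
--     div_x = counts[x]
--     deb = 0
--     for i in range(1, x):
--         if counts[i] > div_x:
--             deb += 1
--     return deb
-- ===== Notes on version B (the rewrite author's own statement) =====
-- stated objective: faster
-- what changed: Replaces the per-number trial-division divisor count (an O(x) scan inside an O(x) loop) by a single sieve that bumps every proper multiple of each d once, then one comparison pass.
import Mathlib
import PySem

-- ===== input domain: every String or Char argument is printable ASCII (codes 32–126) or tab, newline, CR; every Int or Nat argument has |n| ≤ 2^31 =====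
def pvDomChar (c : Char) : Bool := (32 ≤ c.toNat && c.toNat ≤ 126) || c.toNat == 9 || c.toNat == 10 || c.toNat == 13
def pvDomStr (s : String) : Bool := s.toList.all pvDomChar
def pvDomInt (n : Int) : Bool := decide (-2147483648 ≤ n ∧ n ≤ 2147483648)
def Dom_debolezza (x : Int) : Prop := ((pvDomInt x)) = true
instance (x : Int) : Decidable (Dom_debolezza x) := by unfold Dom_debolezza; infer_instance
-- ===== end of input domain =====

-- B replaces A's trial division per number by one multiples sieve (measured faster, asymptotic).

-- ===== PORT A =====
def numerodivisori (x : Int) : Int :=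
  (PySem.List.pyRange 1 x 1).foldl (fun div i => if PySem.Int.mod x i == 0 then div + 1 else div) 0

def debolezza (x : Int) : Int :=
  let div_x := numerodivisori x
  (PySem.List.pyRange 1 x 1).foldl
    (fun deb i => let div_i := numerodivisori i; if div_i > div_x then deb + 1 else deb) 0

-- ===== PORT B =====
-- counts[k*d] += 1 ported as set/getD at index (k*d).toNat: exact because every
-- visited index k*d lies in [2, x], i.e. nonnegative and within the list's length x+1.
def debolezza_alt (x : Int) : Int :=
  if x ≤ 1 then 0
  else
    let counts : List Int :=
      (PySem.List.pyRange 1 x 1).foldl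
        (fun c d =>
          (PySem.List.pyRange 2 (PySem.Int.floordiv x d + 1) 1).foldl
            (fun c k => c.set (k * d).toNat (c.getD (k * d).toNat 0 + 1)) c)
        (List.replicate (x + 1).toNat 0)
    let div_x := counts.getD x.toNat 0
    (PySem.List.pyRange 1 x 1).foldl
      (fun deb i => if counts.getD i.toNat 0 > div_x then deb + 1 else deb) 0

-- ===== PRECONDITION & SPEC =====
def Spec_debolezza (x : Int) (out : Int) : Prop := out = debolezza_alt x
instance (x : Int) (out : Int) : Decidable (Spec_debolezza x out) := by unfold Spec_debolezza; infer_instance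

-- ===== CLAIM (what is proved, stated in full; the proofs are below) =====
def Claim_equal_debolezza : Prop := ∀ (x : Int), Dom_debolezza x → Spec_debolezza x (debolezza x)

-- ===== LEMMAS AND PROOFS =====

-- A's divisor count as a countP of divisibility
theorem numerodivisori_eq (n : Int) :
    numerodivisori n = ((PySem.List.pyRange 1 n 1).countP (fun d => decide (d ∣ n)) : Int) := by
  unfold numerodivisori
  rw [PySem.List.foldl_if_add_one, zero_add]
  congr 1
  refine List.countP_congr ?_
  intro d hd
  have h1 : 1 ≤ d := (PySem.List.mem_pyRange_one.1 hd).1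
  simp [PySem.Int.mod_eq_zero_iff_dvd]

-- length is preserved by the increment fold
theorem len_incfold (L : List Int) (f : Int → Nat) (c : List Int) :
    (L.foldl (fun c k => c.set (f k) (c.getD (f k) 0 + 1)) c).length = c.length := by
  induction L generalizing c with
  | nil => rfl
  | cons k L ih => rw [List.foldl_cons, ih, List.length_set]

-- getD after the increment fold
theorem getD_incfold (L : List Int) (f : Int → Nat) (c : List Int) (m : Nat) (hm : m < c.length) :
    (L.foldl (fun c k => c.set (f k) (c.getD (f k) 0 + 1)) c).getD m 0
      = c.getD m 0 + (L.countP (fun k => f k == m) : Int) := by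
  induction L generalizing c with
  | nil => simp
  | cons k L ih =>
    rw [List.foldl_cons, ih _ (by simpa using hm), List.countP_cons]
    by_cases h : f k = m
    · subst h
      rw [List.getD_eq_getElem?_getD, List.getElem?_set_self hm]
      simp [List.getD_eq_getElem?_getD]
      ring
    · rw [List.getD_eq_getElem?_getD, List.getElem?_set_ne h, ← List.getD_eq_getElem?_getD]
      simp [h]

-- getD after the whole sieve (outer fold over d, inner over g d)
theorem getD_sieve (D : List Int) (g : Int → List Int) (c : List Int) (m : Nat) (hm : m < c.length) :
    (D.foldl (fun c d => (g d).foldl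
        (fun c k => c.set (k * d).toNat (c.getD (k * d).toNat 0 + 1)) c) c).getD m 0
      = c.getD m 0 + ((D.map (fun d => ((g d).countP (fun k => (k * d).toNat == m) : Int))).sum) := by
  induction D generalizing c with
  | nil => simp
  | cons d D ih =>
    rw [List.foldl_cons, ih _ (by rw [len_incfold (f := fun k => (k * d).toNat)]; exact hm),
      getD_incfold _ _ _ _ hm]
    simp
    ring

-- value of the inner count: 1 iff d is a proper-half divisor of mi
theorem inner_count (x d mi : Int) (hd : 0 < d) (hmi : 0 < mi) (hmx : mi ≤ x) :
    (((PySem.List.pyRange 2 (PySem.Int.floordiv x d + 1) 1).countP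
        (fun k => (k * d).toNat == mi.toNat) : Nat) : Int)
      = if d ∣ mi ∧ 2 * d ≤ mi then 1 else 0 := by
  have hpred : ∀ k ∈ PySem.List.pyRange 2 (PySem.Int.floordiv x d + 1) 1,
      ((k * d).toNat == mi.toNat) = true ↔ k * d = mi := by
    intro k hk
    have h2 : 2 ≤ k := (PySem.List.mem_pyRange_one.1 hk).1
    have hkd : 0 ≤ k * d := by positivity
    constructor
    · intro h
      have hh : (k * d).toNat = mi.toNat := by simpa using h
      omega
    · intro h; simp [h]
  by_cases h : d ∣ mi ∧ 2 * d ≤ mi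
  · obtain ⟨⟨q, hq⟩, h2d⟩ := h
    -- mi = d * q, so the only k with k*d = mi is q
    have hq' : q * d = mi := by rw [hq]; ring
    have hcong : (PySem.List.pyRange 2 (PySem.Int.floordiv x d + 1) 1).countP
        (fun k => (k * d).toNat == mi.toNat)
        = (PySem.List.pyRange 2 (PySem.Int.floordiv x d + 1) 1).countP (fun k => k == q) := by
      refine List.countP_congr ?_
      intro k hk
      rw [hpred k hk]
      constructor
      · intro hkd
        have : k * d = q * d := by omega
        have := mul_right_cancel₀ (by omega : d ≠ 0) this
        simp [this]
      · intro hkq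
        have hk' : k = q := by simpa using hkq
        rw [hk', hq']
    rw [hcong]
    have hqmem : q ∈ PySem.List.pyRange 2 (PySem.Int.floordiv x d + 1) 1 := by
      rw [PySem.List.mem_pyRange_one]
      constructor
      · nlinarith
      · have : q ≤ PySem.Int.floordiv x d := (PySem.Int.le_floordiv_iff_mul_le hd).2 (le_of_eq_of_le hq' hmx)
        omega
    have : (PySem.List.pyRange 2 (PySem.Int.floordiv x d + 1) 1).countP (fun k => k == q)
        = (PySem.List.pyRange 2 (PySem.Int.floordiv x d + 1) 1).count q := rfl
    rw [this, List.count_eq_one_of_mem (PySem.List.nodup_pyRange_one _ _) hqmem,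
      if_pos ⟨⟨q, hq⟩, h2d⟩]
    norm_num
  · have : (PySem.List.pyRange 2 (PySem.Int.floordiv x d + 1) 1).countP
        (fun k => (k * d).toNat == mi.toNat) = 0 := by
      rw [List.countP_eq_zero]
      intro k hk hkp
      have hkmi : k * d = mi := (hpred k hk).1 hkp
      have h2 : 2 ≤ k := (PySem.List.mem_pyRange_one.1 hk).1
      exact h ⟨⟨k, by rw [mul_comm] at hkmi; omega⟩, by nlinarith⟩
    rw [this]
    simp [h]

-- counting half-bounded divisors over [1,x) = counting divisors over [1,mi)
theorem countP_half_divisors (x mi : Int) (h1 : 1 ≤ mi) (h2 : mi ≤ x) :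
    (((PySem.List.pyRange 1 x 1).countP (fun d => decide (d ∣ mi ∧ 2 * d ≤ mi)) : Nat) : Int)
      = numerodivisori mi := by
  rw [PySem.List.pyRange_one_append 1 mi x h1 h2, List.countP_append]
  have hz : (PySem.List.pyRange mi x 1).countP (fun d => decide (d ∣ mi ∧ 2 * d ≤ mi)) = 0 := by
    rw [List.countP_eq_zero]
    intro d hd hp
    have hmd : mi ≤ d := (PySem.List.mem_pyRange_one.1 hd).1
    have : d ∣ mi ∧ 2 * d ≤ mi := by simpa using hp
    omega
  have hc : (PySem.List.pyRange 1 mi 1).countP (fun d => decide (d ∣ mi ∧ 2 * d ≤ mi))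
      = (PySem.List.pyRange 1 mi 1).countP (fun d => decide (d ∣ mi)) := by
    refine List.countP_congr ?_
    intro d hd
    obtain ⟨hd1, hdm⟩ := PySem.List.mem_pyRange_one.1 hd
    simp only [decide_eq_true_eq]
    constructor
    · exact fun h => h.1
    · intro hdvd
      refine ⟨hdvd, ?_⟩
      obtain ⟨c, hc⟩ := hdvd
      have hc2 : 2 ≤ c := by nlinarith
      nlinarith
  rw [hz, hc, Nat.add_zero, numerodivisori_eq]

-- the sieve's cell mi holds numerodivisori mi, for 1 ≤ mi ≤ x
theorem sieve_value (x mi : Int) (h1 : 1 ≤ mi) (h2 : mi ≤ x) :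
    ((PySem.List.pyRange 1 x 1).foldl
        (fun c d => (PySem.List.pyRange 2 (PySem.Int.floordiv x d + 1) 1).foldl
          (fun c k => c.set (k * d).toNat (c.getD (k * d).toNat 0 + 1)) c)
        (List.replicate (x + 1).toNat 0)).getD mi.toNat 0
      = numerodivisori mi := by
  rw [getD_sieve _ _ _ _ (by rw [List.length_replicate]; omega)]
  rw [List.getD_replicate]
  rw [zero_add]
  have hmap : (PySem.List.pyRange 1 x 1).map
      (fun d => (((PySem.List.pyRange 2 (PySem.Int.floordiv x d + 1) 1).countP
        (fun k => (k * d).toNat == mi.toNat) : Nat) : Int))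
      = (PySem.List.pyRange 1 x 1).map
        (fun d => if d ∣ mi ∧ 2 * d ≤ mi then (1 : Int) else 0) := by
    refine List.map_congr_left ?_
    intro d hd
    exact inner_count x d mi (by
      have := (PySem.List.mem_pyRange_one.1 hd).1; omega) (by omega) h2
  rw [hmap, ← countP_half_divisors x mi h1 h2, ← PySem.List.sum_map_ite_one_zero
    (p := fun d => decide (d ∣ mi ∧ 2 * d ≤ mi))]
  simp
  omega

theorem main (x : Int) : debolezza x = debolezza_alt x := by
  by_cases hx : x ≤ 1
  · simp [debolezza, debolezza_alt, PySem.List.pyRange_one_eq_nil hx]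
  · simp only [debolezza, debolezza_alt, if_neg hx]
    rw [sieve_value x x (by omega) le_rfl]
    refine PySem.List.foldl_congr_mem' _ _ _ _ ?_
    intro i hi acc
    obtain ⟨hi1, hix⟩ := PySem.List.mem_pyRange_one.1 hi
    rw [sieve_value x i hi1 (by omega)]

-- ===== VERDICT (by name: the statement is the Claim_ definition above) =====
theorem debolezza_spec : Claim_equal_debolezza := by
  intro x _
  exact main x
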